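-- pv_equiv track=rewrite | github.com/arcoris/pool | bench/scripts/plot_benchmarks.py | split_csv_tables
-- ===== SOURCE A (Python) =====
-- from typing import Callable, Iterable, List, Optional, Sequence, TypeVar
--
-- def split_csv_tables(rows: Iterable[List[str]]) -> List[List[List[str]]]:
--     """Split a CSV stream into logical tables separated by blank rows.
--
--     Benchstat-style CSV output may contain multiple tables in one file. The
--     simplest portable delimiter across CSV readers is a fully blank row.
--     """
--     tables: List[List[List[str]]] = []
--     current: List[List[str]] = []
--
--     for row in rows:
--         normalized = [cell.strip() for cell in row]
--         if not any(normalized):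
--             if current:
--                 tables.append(current)
--                 current = []
--             continue
--         current.append(normalized)
--
--     if current:
--         tables.append(current)
--
--     return tables
-- ===== SOURCE B (Python) =====
-- def split_csv_tables(rows):
--     """Split a CSV stream into logical tables separated by blank rows.
--
--     Run-scan decomposition: normalize all rows once, then walk the list with
--     two indices, slicing out each maximal run of non-blank rows as a table.
--     """
--     norm = [[cell.strip() for cell in row] for row in rows]
--     tables = []
--     i, n = 0, len(norm)
--     while i < n:
--         if not any(norm[i]):
--             i += 1
--             continue
--         j = i
--         while j < n and any(norm[j]):
--             j += 1
--         tables.append(norm[i:j])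
--         i = j
--     return tables
-- ===== Notes on version B (the rewrite author's own statement) =====
-- stated objective: alternative
-- what changed: Replaced A's single-pass accumulator/flush state machine with a normalize-first pass followed by a two-index run scan that slices out each maximal run of non-blank rows as a table.
import Mathlib
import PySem

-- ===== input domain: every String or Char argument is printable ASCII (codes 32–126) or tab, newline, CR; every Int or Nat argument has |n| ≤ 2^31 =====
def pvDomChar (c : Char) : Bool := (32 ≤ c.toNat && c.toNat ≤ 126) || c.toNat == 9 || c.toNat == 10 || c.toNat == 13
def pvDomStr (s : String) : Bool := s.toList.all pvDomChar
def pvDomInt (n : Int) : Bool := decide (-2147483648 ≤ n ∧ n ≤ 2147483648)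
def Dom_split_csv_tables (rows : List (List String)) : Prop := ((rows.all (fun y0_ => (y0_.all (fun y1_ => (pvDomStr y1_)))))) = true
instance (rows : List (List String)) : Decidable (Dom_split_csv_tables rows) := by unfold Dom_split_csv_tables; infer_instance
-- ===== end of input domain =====

-- B replaces A's accumulator/flush state machine by a normalize-then-run-scan decomposition (objective: alternative; same cost).


-- ===== PORT A =====
-- truthiness of any(row) for a row of strings: some cell is a nonempty string
def pvAnyRow (r : List String) : Bool := r.any (fun s => !(s == ""))

def split_csv_tables (rows : List (List String)) : List (List (List String)) :=
  let st := rows.foldl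
    (fun (st : List (List (List String)) × List (List String)) row =>
      let normalized := row.map (fun cell => PySem.Str.strip cell)
      if !(pvAnyRow normalized) then
        if st.2 ≠ [] then (st.1 ++ [st.2], []) else st
      else (st.1, st.2 ++ [normalized]))
    ([], [])
  if st.2 ≠ [] then st.1 ++ [st.2] else st.1

-- ===== PORT B =====
-- inner while of Source B: advance j over the maximal leading run of non-blank rows; returns (run, rest)
def pvTakeRun : List (List String) → List (List String) × List (List String)
  | [] => ([], [])
  | r :: rest =>
    if pvAnyRow r then
      let p := pvTakeRun rest
      (r :: p.1, p.2)
    else ([], r :: rest)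

theorem pvTakeRun_rest_len : ∀ (l : List (List String)), (pvTakeRun l).2.length ≤ l.length := by
  intro l
  induction l with
  | nil => simp [pvTakeRun]
  | cons r rest ih =>
    simp only [pvTakeRun]
    split
    · exact le_trans ih (Nat.le_succ _)
    · simp

-- outer while of Source B: skip blank rows, emit each non-blank run as a table
def pvGroups : List (List String) → List (List (List String))
  | [] => []
  | r :: rest =>
    if pvAnyRow r then
      (r :: (pvTakeRun rest).1) :: pvGroups (pvTakeRun rest).2
    else pvGroups rest
termination_by l => l.length
decreasing_by
  · exact Nat.lt_succ_of_le (pvTakeRun_rest_len rest)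
  · simp

def split_csv_tables_alt (rows : List (List String)) : List (List (List String)) :=
  pvGroups (rows.map (fun row => row.map (fun cell => PySem.Str.strip cell)))

-- ===== PRECONDITION & SPEC =====
def Spec_split_csv_tables (rows : List (List String)) (out : List (List (List String))) : Prop := out = split_csv_tables_alt rows
instance (rows : List (List String)) (out : List (List (List String))) : Decidable (Spec_split_csv_tables rows out) := by unfold Spec_split_csv_tables; infer_instance

-- ===== CLAIM (what is proved, stated in full; the proofs are below) =====
def Claim_equal_split_csv_tables : Prop := ∀ (rows : List (List String)), Dom_split_csv_tables rows → Spec_split_csv_tables rows (split_csv_tables rows)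

-- ===== LEMMAS AND PROOFS =====

-- A's state machine continued from an in-progress current run `cur` (pending flush at the end)
def pvG (cur : List (List String)) : List (List String) → List (List (List String))
  | [] => if cur = [] then [] else [cur]
  | r :: rest =>
    if pvAnyRow r then pvG (cur ++ [r]) rest
    else (if cur = [] then [] else [cur]) ++ pvG [] rest

-- the fold step of A, on already-normalized rows
def pvStep (st : List (List (List String)) × List (List String)) (r : List String) :
    List (List (List String)) × List (List String) :=
  if !(pvAnyRow r) then
    if st.2 ≠ [] then (st.1 ++ [st.2], []) else st
  else (st.1, st.2 ++ [r])

theorem pvFold_eq_pvG (l : List (List String)) :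
    ∀ (acc : List (List (List String))) (cur : List (List String)),
    (if (l.foldl pvStep (acc, cur)).2 ≠ [] then
        (l.foldl pvStep (acc, cur)).1 ++ [(l.foldl pvStep (acc, cur)).2]
      else (l.foldl pvStep (acc, cur)).1) = acc ++ pvG cur l := by
  induction l with
  | nil =>
    intro acc cur
    simp only [List.foldl_nil, pvG]
    by_cases h : cur = [] <;> simp [h]
  | cons r rest ih =>
    intro acc cur
    simp only [List.foldl_cons, pvG]
    by_cases hr : pvAnyRow r
    · simpa [pvStep, hr] using ih acc (cur ++ [r])
    · by_cases hc : cur = []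
      · simpa [pvStep, hr, hc] using ih acc []
      · simpa [pvStep, hr, hc, List.append_assoc] using ih (acc ++ [cur]) []

theorem pvG_eq_pvGroups : ∀ (n : Nat) (l : List (List String)), l.length ≤ n →
    (pvG [] l = pvGroups l) ∧
    (∀ cur : List (List String), cur ≠ [] →
      pvG cur l = (cur ++ (pvTakeRun l).1) :: pvGroups (pvTakeRun l).2) := by
  intro n
  induction n with
  | zero =>
    intro l hl
    have : l = [] := List.length_eq_zero_iff.mp (Nat.le_zero.mp hl)
    subst this
    refine ⟨by simp [pvG, pvGroups], fun cur hc => by simp [pvG, pvGroups, pvTakeRun, hc]⟩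
  | succ n ih =>
    intro l hl
    cases l with
    | nil =>
      refine ⟨by simp [pvG, pvGroups], fun cur hc => by simp [pvG, pvGroups, pvTakeRun, hc]⟩
    | cons r rest =>
      have hrest : rest.length ≤ n := Nat.le_of_succ_le_succ hl
      constructor
      · by_cases hr : pvAnyRow r
        · have h2 := (ih rest hrest).2 [r] (by simp)
          simp only [pvG, pvGroups, hr, if_pos]
          simpa using h2
        · simp only [pvG, pvGroups, hr]
          simpa using (ih rest hrest).1
      · intro cur hc
        by_cases hr : pvAnyRow r
        · have h2 := (ih rest hrest).2 (cur ++ [r]) (by simp)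
          simp only [pvG, pvTakeRun, hr, ite_true, h2, List.append_assoc, List.cons_append,
            List.nil_append]
        · have h1 := (ih rest hrest).1
          simp [pvG, pvGroups, pvTakeRun, hr, hc, h1]

-- ===== VERDICT (by name: the statement is the Claim_ definition above) =====
theorem split_csv_tables_spec : Claim_equal_split_csv_tables := by
  intro rows _
  unfold Spec_split_csv_tables split_csv_tables split_csv_tables_alt
  have hmap : rows.foldl
      (fun (st : List (List (List String)) × List (List String)) row =>
        let normalized := row.map (fun cell => PySem.Str.strip cell)
        if !(pvAnyRow normalized) then
          if st.2 ≠ [] then (st.1 ++ [st.2], []) else st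
        else (st.1, st.2 ++ [normalized]))
      ([], []) =
      (rows.map (fun row => row.map (fun cell => PySem.Str.strip cell))).foldl pvStep ([], []) := by
    rw [List.foldl_map]; rfl
  simp only [hmap]
  rw [pvFold_eq_pvG]
  rw [(pvG_eq_pvGroups _ _ (Nat.le_refl _)).1]
  simp
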